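-- pv_equiv track=rewrite | github.com/Wajktor13/concurrent-gaussian-elimination | implementation/graph_foata_generator/main.py | create_dependency_graph_matrix
-- ===== SOURCE A (Python) =====
-- def get_dependency_relation(operations):
--     """
--     algorithm:
--     for all pairs of operations check if one of them saves to a variable from
--     which the other operation reads and vice versa - if at least one of this
--     conditions is fulfilled, the pair of operations is added to the dependecy
--     relation (dr)
--     """
--
--     dr = []
--
--     for op_id1, op1 in operations.items():
--         save_to1 = op1[0]
--         read_from1 = op1[1]
--
--         for op_id2, op2 in operations.items():
--             save_to2 = op2[0]
--             read_from2 = op2[1]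
--
--             if save_to1 in read_from2 or save_to2 in read_from1:
--                 dr.append((op_id1, op_id2))
--
--     # set for uniqueness
--     return  sorted(list(set(dr)))
--
-- def create_dependency_graph_matrix(operations, trace):
--     n = len(trace)
--     dr = get_dependency_relation(operations)
--
--     graph_matrix = [[0 for _ in range(n)] for _ in range(n)]
--     for i in range(n):
--         for j in range(i + 1, n):
--             if (trace[i], trace[j]) in dr:
--                 graph_matrix[i][j] = 1
--
--     return graph_matrix
-- ===== SOURCE B (Python) =====
-- def create_dependency_graph_matrix(operations, trace):
--     n = len(trace)
--
--     def dep(u, v):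
--         op1 = operations.get(u)
--         op2 = operations.get(v)
--         if op1 is None or op2 is None:
--             return False
--         return op1[0] in op2[1] or op2[0] in op1[1]
--
--     return [[1 if i < j and dep(trace[i], trace[j]) else 0 for j in range(n)]
--             for i in range(n)]
-- ===== Notes on version B (the rewrite author's own statement) =====
-- stated objective: faster
-- what changed: B drops the all-pairs dependency-relation precompute (the sorted deduplicated dr list A builds and then scans by linear membership per cell) and builds the matrix directly with a comprehension, testing the read/write dependency once per cell via two dict lookups with a membership guard for trace ids absent from operations.
import Mathlib
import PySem

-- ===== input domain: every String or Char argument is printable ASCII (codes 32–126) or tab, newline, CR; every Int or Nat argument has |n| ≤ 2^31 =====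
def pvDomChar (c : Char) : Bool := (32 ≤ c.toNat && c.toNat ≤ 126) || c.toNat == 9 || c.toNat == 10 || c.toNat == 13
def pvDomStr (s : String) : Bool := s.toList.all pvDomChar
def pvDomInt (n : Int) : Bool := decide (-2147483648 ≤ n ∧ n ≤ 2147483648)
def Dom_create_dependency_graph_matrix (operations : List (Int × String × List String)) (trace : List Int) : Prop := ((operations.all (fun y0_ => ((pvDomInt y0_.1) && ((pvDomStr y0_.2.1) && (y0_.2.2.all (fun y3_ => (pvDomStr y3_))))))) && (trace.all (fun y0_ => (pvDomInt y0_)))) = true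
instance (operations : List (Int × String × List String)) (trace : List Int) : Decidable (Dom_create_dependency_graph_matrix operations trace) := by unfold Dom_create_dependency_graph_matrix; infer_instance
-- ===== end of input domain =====

-- B builds the matrix directly with two dict lookups per cell, without materializing the
-- sorted deduplicated dependency-relation list A precomputes over all operation pairs.

-- ===== PORT A =====
def get_dependency_relation (operations : List (Int × String × List String)) : List (Int × Int) :=
  let items := (PySem.Dict.ofList operations).items
  let dr := items.foldl (fun dr op1 =>
      items.foldl (fun dr op2 =>
        if op2.2.2.contains op1.2.1 || op1.2.2.contains op2.2.1 then dr ++ [(op1.1, op2.1)] else dr) dr) []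
  PySem.List.sorted2 (PySem.Set.ofList dr) Prod.fst Prod.snd

def create_dependency_graph_matrix (operations : List (Int × String × List String)) (trace : List Int) : List (List Int) :=
  let n := trace.length
  let dr := get_dependency_relation operations
  let graph_matrix := (List.range n).map (fun _ => (List.range n).map (fun _ => (0 : Int)))
  (List.range n).foldl (fun g i =>
    (List.range' (i + 1) (n - (i + 1))).foldl (fun g j =>
      if (trace.getD i 0, trace.getD j 0) ∈ dr then g.set i ((g.getD i []).set j 1) else g) g) graph_matrix

-- ===== PORT B =====
def pvDep (d : PySem.Dict Int (String × List String)) (u v : Int) : Bool :=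
  match PySem.Dict.get? d u, PySem.Dict.get? d v with
  | some op1, some op2 => op2.2.contains op1.1 || op1.2.contains op2.1
  | _, _ => false

def create_dependency_graph_matrix_alt (operations : List (Int × String × List String)) (trace : List Int) : List (List Int) :=
  let d := PySem.Dict.ofList operations
  let n := trace.length
  (List.range n).map (fun i => (List.range n).map (fun j =>
    if i < j && pvDep d (trace.getD i 0) (trace.getD j 0) then (1 : Int) else 0))

-- ===== PRECONDITION & SPEC =====
def Spec_create_dependency_graph_matrix (operations : List (Int × String × List String)) (trace : List Int) (out : List (List Int)) : Prop := out = create_dependency_graph_matrix_alt operations trace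
instance (operations : List (Int × String × List String)) (trace : List Int) (out : List (List Int)) : Decidable (Spec_create_dependency_graph_matrix operations trace out) := by unfold Spec_create_dependency_graph_matrix; infer_instance

-- ===== CLAIM (what is proved, stated in full; the proofs are below) =====
def Claim_equal_create_dependency_graph_matrix : Prop := ∀ (operations : List (Int × String × List String)) (trace : List Int), Dom_create_dependency_graph_matrix operations trace → Spec_create_dependency_graph_matrix operations trace (create_dependency_graph_matrix operations trace)

-- ===== LEMMAS AND PROOFS =====

-- dr membership characterisation: (a, b) is in A's dependency relation iff B's dep test fires.
lemma mem_dr_iff (operations : List (Int × String × List String)) (a b : Int) :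
    (a, b) ∈ get_dependency_relation operations ↔
      pvDep (PySem.Dict.ofList operations) a b = true := by
  have hred : get_dependency_relation operations = PySem.List.sorted2 (PySem.Set.ofList
    ((PySem.Dict.ofList operations).items.foldl (fun dr op1 =>
      (PySem.Dict.ofList operations).items.foldl (fun dr op2 =>
        if op2.2.2.contains op1.2.1 || op1.2.2.contains op2.2.1 then dr ++ [(op1.1, op2.1)] else dr) dr) []))
    Prod.fst Prod.snd := rfl
  rw [hred]
  have hperm := PySem.List.sorted2_perm (xs := PySem.Set.ofList
    ((PySem.Dict.ofList operations).items.foldl (fun dr op1 =>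
      (PySem.Dict.ofList operations).items.foldl (fun dr op2 =>
        if op2.2.2.contains op1.2.1 || op1.2.2.contains op2.2.1 then dr ++ [(op1.1, op2.1)] else dr) dr) []))
    (k1 := Prod.fst) (k2 := Prod.snd) (rev := false)
  rw [hperm.mem_iff, PySem.Set.mem_ofList]
  have h1 : ∀ (acc : List (Int × Int)) (op1 : Int × String × List String),
      (PySem.Dict.ofList operations).items.foldl (fun dr op2 =>
        if op2.2.2.contains op1.2.1 || op1.2.2.contains op2.2.1 then dr ++ [(op1.1, op2.1)] else dr) acc =
      acc ++ ((PySem.Dict.ofList operations).items.filter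
        (fun op2 => op2.2.2.contains op1.2.1 || op1.2.2.contains op2.2.1)).map (fun op2 => (op1.1, op2.1)) :=
    fun acc op1 => PySem.List.foldl_append_if
      (fun op2 : Int × String × List String => op2.2.2.contains op1.2.1 || op1.2.2.contains op2.2.1)
      (fun op2 : Int × String × List String => (op1.1, op2.1)) _ _
  simp only [h1]
  rw [PySem.List.foldl_append_eq_flatMap]
  have hnd : (PySem.Dict.ofList operations).keys.Nodup := PySem.Dict.nodup_keys_ofList _
  simp only [List.nil_append, List.mem_flatMap, List.mem_map, List.mem_filter]
  constructor
  · rintro ⟨op1, h1m, op2, ⟨h2m, hcond⟩, heq⟩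
    injection heq with ha' hb'
    have ha : PySem.Dict.get? (PySem.Dict.ofList operations) a = some op1.2 := by
      refine PySem.Dict.get?_of_mem_items _ ?_ hnd
      rw [← ha']; simpa using h1m
    have hb : PySem.Dict.get? (PySem.Dict.ofList operations) b = some op2.2 := by
      refine PySem.Dict.get?_of_mem_items _ ?_ hnd
      rw [← hb']; simpa using h2m
    simp [pvDep, ha, hb]
    simpa using hcond
  · intro h
    unfold pvDep at h
    cases hu : PySem.Dict.get? (PySem.Dict.ofList operations) a with
    | none => rw [hu] at h; simp at h
    | some op1 =>
      cases hv : PySem.Dict.get? (PySem.Dict.ofList operations) b with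
      | none => rw [hu, hv] at h; simp at h
      | some op2 =>
        rw [hu, hv] at h
        refine ⟨(a, op1), PySem.Dict.mem_items_of_get?_eq_some _ hu, (b, op2),
          ⟨PySem.Dict.mem_items_of_get?_eq_some _ hv, ?_⟩, rfl⟩
        simpa using h

def pvGet2 (g : List (List Int)) (p q : Nat) : Int := (g.getD p []).getD q 0

def pvShape (g : List (List Int)) (n : Nat) : Prop :=
  g.length = n ∧ ∀ p < n, (g.getD p []).length = n

lemma getD_eq_getElem' (g : List (List Int)) (p : Nat) (hp : p < g.length) :
    g.getD p [] = g[p] := by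
  simp [List.getD_eq_getElem?_getD, List.getElem?_eq_getElem hp]

lemma shape_set (g : List (List Int)) (n i j : Nat) (hs : pvShape g n) :
    pvShape (g.set i ((g.getD i []).set j 1)) n := by
  obtain ⟨hl, hr⟩ := hs
  refine ⟨by simp [hl], ?_⟩
  intro p hp
  have hp' : p < g.length := by omega
  by_cases hpi : i = p
  · subst hpi
    rw [getD_eq_getElem' _ _ (by simpa using hp'), List.getElem_set_self (by simpa using hp'),
        List.length_set]
    exact hr i hp
  · rw [getD_eq_getElem' _ _ (by simpa using hp'), List.getElem_set_ne (by omega),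
        ← getD_eq_getElem' _ _ hp']
    exact hr p hp

lemma get2_set (g : List (List Int)) (n i j p q : Nat) (hs : pvShape g n)
    (hi : i < n) (hj : j < n) :
    pvGet2 (g.set i ((g.getD i []).set j 1)) p q =
      if p = i ∧ q = j then 1 else pvGet2 g p q := by
  obtain ⟨hl, hr⟩ := hs
  unfold pvGet2
  by_cases hpi : p = i
  · subst hpi
    have hp' : p < g.length := by omega
    rw [getD_eq_getElem' _ _ (by simpa using hp'), List.getElem_set_self (by simpa using hp'),
        getD_eq_getElem' _ _ hp']
    have hrow : g[p].length = n := by rw [← getD_eq_getElem' _ _ hp']; exact hr p hi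
    by_cases hqj : q = j
    · subst hqj
      simp [List.getD_eq_getElem?_getD, hrow, hj]
    · simp [List.getD_eq_getElem?_getD, List.getElem?_set_ne (by omega : j ≠ q), hqj]
  · by_cases hp' : p < g.length
    · rw [getD_eq_getElem' _ _ (by simpa using hp'), List.getElem_set_ne (by omega),
          ← getD_eq_getElem' _ _ hp']
      simp [hpi]
    · have h1 : (g.set i ((g.getD i []).set j 1)).getD p [] = [] :=
        List.getD_eq_default _ _ (by simpa using (not_lt.mp hp'))
      have h2 : g.getD p [] = [] := List.getD_eq_default _ _ (not_lt.mp hp')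
      rw [h1, h2]
      simp [hpi]

lemma inner_loop (dr : List (Int × Int)) (trace : List Int) (n i : Nat) (hi : i < n) :
    ∀ (js : List Nat) (g : List (List Int)), pvShape g n → (∀ j ∈ js, j < n) →
    (pvShape (js.foldl (fun g j =>
        if (trace.getD i 0, trace.getD j 0) ∈ dr then g.set i ((g.getD i []).set j 1) else g) g) n ∧
     ∀ p q, pvGet2 (js.foldl (fun g j =>
        if (trace.getD i 0, trace.getD j 0) ∈ dr then g.set i ((g.getD i []).set j 1) else g) g) p q =
      if p = i ∧ q ∈ js ∧ (trace.getD i 0, trace.getD q 0) ∈ dr then 1 else pvGet2 g p q) := by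
  intro js
  induction js with
  | nil =>
    intro g hs _
    exact ⟨hs, by simp⟩
  | cons j js ih =>
    intro g hs hjs
    have hj : j < n := hjs j List.mem_cons_self
    simp only [List.foldl_cons]
    by_cases hc0 : (trace.getD i 0, trace.getD j 0) ∈ dr
    · rw [if_pos hc0]
      obtain ⟨hsh, hent⟩ := ih (g.set i ((g.getD i []).set j 1)) (shape_set g n i j hs)
        (fun x hx => hjs x (List.mem_cons_of_mem _ hx))
      refine ⟨hsh, ?_⟩
      intro p q
      rw [hent p q, get2_set g n i j p q hs hi hj]
      by_cases hp : p = i <;> by_cases hqj : q = j <;> simp_all [List.mem_cons]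
    · rw [if_neg hc0]
      obtain ⟨hsh, hent⟩ := ih g hs (fun x hx => hjs x (List.mem_cons_of_mem _ hx))
      refine ⟨hsh, ?_⟩
      intro p q
      rw [hent p q]
      by_cases hp : p = i <;> by_cases hqj : q = j <;> simp_all [List.mem_cons]

lemma outer_loop (dr : List (Int × Int)) (trace : List Int) (n : Nat) :
    ∀ (is : List Nat) (g : List (List Int)), pvShape g n → (∀ i ∈ is, i < n) →
    (pvShape (is.foldl (fun g i =>
        (List.range' (i + 1) (n - (i + 1))).foldl (fun g j =>
          if (trace.getD i 0, trace.getD j 0) ∈ dr then g.set i ((g.getD i []).set j 1) else g) g) g) n ∧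
     ∀ p q, pvGet2 (is.foldl (fun g i =>
        (List.range' (i + 1) (n - (i + 1))).foldl (fun g j =>
          if (trace.getD i 0, trace.getD j 0) ∈ dr then g.set i ((g.getD i []).set j 1) else g) g) g) p q =
      if p ∈ is ∧ p < q ∧ q < n ∧ (trace.getD p 0, trace.getD q 0) ∈ dr then 1 else pvGet2 g p q) := by
  intro is
  induction is with
  | nil =>
    intro g hs _
    exact ⟨hs, by simp⟩
  | cons i is ih =>
    intro g hs his
    have hi : i < n := his i List.mem_cons_self
    simp only [List.foldl_cons]
    obtain ⟨hs1, hent1⟩ := inner_loop dr trace n i hi (List.range' (i + 1) (n - (i + 1))) g hs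
      (by intro j hj; have := List.mem_range'_1.mp hj; omega)
    obtain ⟨hsh, hent⟩ := ih _ hs1 (fun x hx => his x (List.mem_cons_of_mem _ hx))
    refine ⟨hsh, ?_⟩
    intro p q
    rw [hent p q, hent1 p q]
    have hmem : q ∈ List.range' (i + 1) (n - (i + 1)) ↔ i < q ∧ q < n := by
      rw [List.mem_range'_1]; omega
    simp only [hmem, List.mem_cons]
    by_cases hA : p ∈ is ∧ p < q ∧ q < n ∧ (trace.getD p 0, trace.getD q 0) ∈ dr
    · rw [if_pos hA, if_pos (by tauto)]
    · rw [if_neg hA]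
      by_cases hB : p = i ∧ (i < q ∧ q < n) ∧ (trace.getD i 0, trace.getD q 0) ∈ dr
      · obtain ⟨hpi, ⟨hiq, hqn⟩, hc⟩ := hB
        subst hpi
        rw [if_pos ⟨rfl, ⟨hiq, hqn⟩, hc⟩, if_pos ⟨Or.inl rfl, hiq, hqn, hc⟩]
      · rw [if_neg hB]
        refine (if_neg fun hC => ?_).symm
        rcases hC with ⟨hor, hpq, hqn, hc⟩
        rcases hor with hpi | hpis
        · subst hpi; exact hB ⟨rfl, ⟨hpq, hqn⟩, hc⟩
        · exact hA ⟨hpis, hpq, hqn, hc⟩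

-- ===== VERDICT (by name: the statement is the Claim_ definition above) =====
theorem create_dependency_graph_matrix_spec : Claim_equal_create_dependency_graph_matrix := by
  intro operations trace _
  show create_dependency_graph_matrix operations trace = create_dependency_graph_matrix_alt operations trace
  have hredA : create_dependency_graph_matrix operations trace =
      (List.range trace.length).foldl (fun g i =>
        (List.range' (i + 1) (trace.length - (i + 1))).foldl (fun g j =>
          if (trace.getD i 0, trace.getD j 0) ∈ get_dependency_relation operations then
            g.set i ((g.getD i []).set j 1) else g) g)
        ((List.range trace.length).map (fun _ => (List.range trace.length).map (fun _ => (0 : Int)))) := rfl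
  have hredB : create_dependency_graph_matrix_alt operations trace =
      (List.range trace.length).map (fun i => (List.range trace.length).map (fun j =>
        if i < j && pvDep (PySem.Dict.ofList operations) (trace.getD i 0) (trace.getD j 0) then (1 : Int) else 0)) := rfl
  rw [hredA, hredB]
  set n := trace.length with hn
  set dr := get_dependency_relation operations with hdr
  set zeros := (List.range n).map (fun _ => (List.range n).map (fun _ => (0 : Int))) with hz
  set F := (List.range n).foldl (fun g i =>
      (List.range' (i + 1) (n - (i + 1))).foldl (fun g j =>
        if (trace.getD i 0, trace.getD j 0) ∈ dr then g.set i ((g.getD i []).set j 1) else g) g)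
      zeros with hF
  have hsz : pvShape zeros n := by
    refine ⟨by simp [hz], ?_⟩
    intro p hp
    have h1 : zeros.getD p [] = (List.range n).map (fun _ => (0 : Int)) := by
      rw [hz, List.getD_eq_getElem _ _ (by simpa [hz] using hp), List.getElem_map]
    rw [h1]
    simp
  have hzero : ∀ p q, pvGet2 zeros p q = 0 := by
    intro p q
    unfold pvGet2
    rcases lt_or_ge p n with hp | hp
    · have h1 : zeros.getD p [] = (List.range n).map (fun _ => (0 : Int)) := by
        rw [hz, List.getD_eq_getElem _ _ (by simpa [hz] using hp), List.getElem_map]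
      rw [h1]
      rcases lt_or_ge q n with hq | hq
      · rw [List.getD_eq_getElem _ _ (by simpa using hq), List.getElem_map]
      · exact List.getD_eq_default _ _ (by simpa using hq)
    · have h1 : zeros.getD p [] = [] := List.getD_eq_default _ _ (by simp [hz]; omega)
      rw [h1]
      simp
  obtain ⟨hsh, hent⟩ := outer_loop dr trace n (List.range n) zeros hsz (by simp)
  rw [← hF] at hsh hent
  apply List.ext_getElem
  · rw [hsh.1]; simp
  · intro p hp hp'
    have hpn : p < n := by simpa using hp'
    have r1 : F.getD p [] = F[p] := List.getD_eq_getElem _ _ hp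
    apply List.ext_getElem
    · rw [← r1, hsh.2 p hpn]
      simp
    · intro q hq hq'
      have hqn : q < n := by simpa using hq'
      have e1 : pvGet2 F p q = F[p][q] := by
        unfold pvGet2
        rw [r1]
        exact List.getD_eq_getElem _ _ hq
      rw [← e1, hent p q, hzero p q]
      simp only [List.getElem_map, List.getElem_range]
      simp only [hdr, mem_dr_iff]
      by_cases h1 : p < q <;>
        by_cases h2 : pvDep (PySem.Dict.ofList operations) (trace.getD p 0) (trace.getD q 0) = true <;>
        simp [h1, h2, hpn, hqn, List.mem_range]
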